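-- pv_equiv track=rewrite | github.com/rookieean/arena-belajar | CoddyGame/DailyChallengge/BusinessTech.py | busy_beehive
-- ===== SOURCE A (Python) =====
-- def busy_beehive(num_bees, activities):
--     beehive = ["idle"] * num_bees # inisalisasi sarang lebah, variable list
--     activity_count = {activity: 0 for activity in activities} # inisalisasi kamus lebah
--     activity_index = 0
--
--     for _ in range(5):  # _ karena cuma butuh rangenya doang yg berjalan
--         for i in range(num_bees):
--             activity = activities[activity_index % len(activities)]
--             beehive[i] = activity
--             activity_count[activity] += 1
--             activity_index += 1
--
--     idle_bees = beehive.count("idle")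
--
--     summary = []
--     for activity, count in activity_count.items():
--         summary.append(f"{activity}: {count}")
--     summary.append(f"idle bees: {idle_bees}")
--
--     return ", ".join(summary)
-- ===== SOURCE B (Python) =====
-- def busy_beehive(num_bees, activities):
--     # Closed form instead of simulation: over 5 full passes there are T = 5*n cyclic
--     # assignments; list position p is used ceil((T - p)/L) times, and idle bees come
--     # from the final-pass window [4n, 5n).
--     n = max(num_bees, 0)
--     L = len(activities)
--     total = 5 * n
--     counts = {a: 0 for a in activities}
--     idle = 0
--     for p, a in enumerate(activities):
--         c5 = (total - p + L - 1) // L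
--         c4 = (4 * n - p + L - 1) // L
--         counts[a] += c5
--         if a == "idle":
--             idle += c5 - c4
--     summary = [f"{a}: {c}" for a, c in counts.items()]
--     summary.append(f"idle bees: {idle}")
--     return ", ".join(summary)
-- ===== Notes on version B (the rewrite author's own statement) =====
-- stated objective: alternative
-- what changed: Replaces the 5-pass cyclic assignment simulation (5*num_bees dict increments and list writes) by closed-form modular arithmetic: each activity's count is a ceiling-division residue count over [0,5n), and idle bees come from the final-pass window [4n,5n), computed in one loop over the activity list.
import Mathlib
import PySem

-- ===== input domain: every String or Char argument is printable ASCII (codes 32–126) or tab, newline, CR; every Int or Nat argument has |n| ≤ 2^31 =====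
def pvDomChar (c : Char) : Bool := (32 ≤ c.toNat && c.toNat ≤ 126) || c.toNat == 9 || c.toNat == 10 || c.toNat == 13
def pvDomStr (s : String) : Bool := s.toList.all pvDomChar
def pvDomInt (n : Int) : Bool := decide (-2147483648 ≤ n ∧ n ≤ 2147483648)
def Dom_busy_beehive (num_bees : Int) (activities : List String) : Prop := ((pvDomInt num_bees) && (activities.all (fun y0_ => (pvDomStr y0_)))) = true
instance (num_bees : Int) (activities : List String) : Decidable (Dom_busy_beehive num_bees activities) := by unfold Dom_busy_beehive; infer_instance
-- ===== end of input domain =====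

-- B replaces A's 5-pass cyclic-assignment simulation by closed-form modular counting: ceiling-division residue counts over [0,5n) and a final-pass window for idle bees, in one loop over the activity list.

-- ===== PORT A =====
def busy_beehive (num_bees : Int) (activities : List String) : String :=
  -- ["idle"] * num_bees: a Python list with in-place index assignment — ported as an Array (empty when num_bees < 0)
  let beehive := Array.replicate num_bees.toNat "idle"

  let activity_count : PySem.Dict String Int :=
    activities.foldl (fun d a => d.insert a 0) PySem.Dict.empty
  -- nested loops: for _ in range(5): for i in range(num_bees): …
  -- activities[activity_index % len(activities)] raises outside Pre_ (len = 0): pyGetD/mod only used under Pre_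
  let st :=
    (PySem.List.pyRange 0 5 1).foldl
      (fun (st : Array String × PySem.Dict String Int × Int) _ =>
        (PySem.List.pyRange 0 num_bees 1).foldl
          (fun st i =>
            let activity := PySem.List.pyGetD activities
              (PySem.Int.mod st.2.2 (activities.length : Int)) ""
            -- beehive[i] = activity: i from range(num_bees) is ≥ 0 and < len(beehive), so this is Python's in-range list assignment
            (st.1.setIfInBounds i.toNat activity,
             st.2.1.modify activity 0 (· + 1),    -- activity_count[activity] += 1 (key always present)
             st.2.2 + 1))
          st)
      (beehive, activity_count, 0)
  let idle_bees : Int := (PySem.List.count st.1.toList "idle" : Int)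
  let summary := st.2.1.items.foldl (fun acc p => acc ++ [p.1 ++ ": " ++ PySem.Int.toStr p.2]) []
  let summary := summary ++ ["idle bees: " ++ PySem.Int.toStr idle_bees]
  PySem.Str.join ", " summary

-- ===== PORT B =====
def busy_beehive_alt (num_bees : Int) (activities : List String) : String :=
  let n := max num_bees 0
  let L : Int := (activities.length : Int)
  let total := 5 * n
  let counts0 : PySem.Dict String Int :=
    activities.foldl (fun d a => d.insert a 0) PySem.Dict.empty
  let st :=
    (PySem.List.enumerate activities).foldl
      (fun (st : PySem.Dict String Int × Int) pa =>
        let c5 := PySem.Int.floordiv (total - pa.1 + L - 1) L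
        let c4 := PySem.Int.floordiv (4 * n - pa.1 + L - 1) L
        (st.1.modify pa.2 0 (· + c5),
         if pa.2 == "idle" then st.2 + (c5 - c4) else st.2))
      (counts0, 0)
  let summary := st.1.items.map (fun p => p.1 ++ ": " ++ PySem.Int.toStr p.2)
  PySem.Str.join ", " (summary ++ ["idle bees: " ++ PySem.Int.toStr st.2])

-- ===== PRECONDITION & SPEC =====
-- Pre_ excludes only the inputs where A raises: num_bees > 0 with empty activities (ZeroDivisionError on % 0).
def Pre_busy_beehive (num_bees : Int) (activities : List String) : Prop :=
  num_bees ≤ 0 ∨ activities ≠ []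
instance (num_bees : Int) (activities : List String) : Decidable (Pre_busy_beehive num_bees activities) := by unfold Pre_busy_beehive; infer_instance
def pvWitness_busy_beehive : Int × List String := (7, ["forage", "idle", "dance"])

def Spec_busy_beehive (num_bees : Int) (activities : List String) (out : String) : Prop := out = busy_beehive_alt num_bees activities
instance (num_bees : Int) (activities : List String) (out : String) : Decidable (Spec_busy_beehive num_bees activities out) := by unfold Spec_busy_beehive; infer_instance

-- ===== CLAIM (what is proved, stated in full; the proofs are below) =====
def Claim_equal_busy_beehive : Prop := ∀ (num_bees : Int) (activities : List String), Dom_busy_beehive num_bees activities → Pre_busy_beehive num_bees activities → Spec_busy_beehive num_bees activities (busy_beehive num_bees activities)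

-- ===== LEMMAS AND PROOFS =====

-- The activity assigned at global step m (valid when activities ≠ [])
def pvAct (acts : List String) (m : Int) : String :=
  PySem.List.pyGetD acts (PySem.Int.mod m (acts.length : Int)) ""

-- #{m ∈ [0,T) : m % L = p} as the closed form used by B
def pvCeil (acts : List String) (T p : Int) : Int :=
  PySem.Int.floordiv (T - p + (acts.length : Int) - 1) (acts.length : Int)

-- total count of activity k over the first T assignments, as B computes it
def pvF (acts : List String) (T : Int) (k : String) : Int :=
  ((PySem.List.enumerate acts 0).map (fun pa => if pa.2 = k then pvCeil acts T pa.1 else 0)).sum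

theorem pvEdivAdd (L q s : Int) (hL : L ≠ 0) : (L * q + s) / L = q + s / L := by
  rw [add_comm (L * q) s, Int.add_mul_ediv_left s q hL, add_comm]

theorem pvEdivOne (L s : Int) (hL : 0 < L) (h0 : L ≤ s) (h1 : s < 2 * L) : s / L = 1 := by
  have h : s = L * 1 + (s - L) := by ring
  rw [h, pvEdivAdd L 1 (s - L) (ne_of_gt hL), Int.ediv_eq_zero_of_lt (by omega) (by omega)]
  norm_num

theorem pvCeilStep (acts : List String) (T p : Int) (hL : 0 < (acts.length : Int))
    (hp0 : 0 ≤ p) (hpL : p < (acts.length : Int)) (hT : 0 ≤ T) :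
    pvCeil acts (T + 1) p
      = pvCeil acts T p + (if PySem.Int.mod T (acts.length : Int) = p then 1 else 0) := by
  unfold pvCeil
  set L := (acts.length : Int) with hLdef
  rw [PySem.Int.floordiv_eq_ediv_of_pos hL, PySem.Int.floordiv_eq_ediv_of_pos hL,
      PySem.Int.mod_eq_emod_of_pos hL]
  obtain ⟨q, r, hdm, hr0, hrL, hmod⟩ :
      ∃ q r, L * q + r = T ∧ 0 ≤ r ∧ r < L ∧ T % L = r :=
    ⟨T / L, T % L, Int.ediv_add_emod T L, Int.emod_nonneg T (ne_of_gt hL),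
      Int.emod_lt_of_pos T hL, rfl⟩
  have e1 : T - p + L - 1 = L * q + (r - p + L - 1) := by linear_combination - hdm
  have e2 : T + 1 - p + L - 1 = L * q + (r - p + L) := by linear_combination - hdm
  rw [hmod, e1, e2, pvEdivAdd L _ _ (ne_of_gt hL), pvEdivAdd L _ _ (ne_of_gt hL)]
  by_cases h : r = p
  · have d2 : (r - p + L) / L = 1 := by
      have hx : r - p + L = L := by omega
      rw [hx, Int.ediv_self (ne_of_gt hL)]
    have d1 : (r - p + L - 1) / L = 0 := Int.ediv_eq_zero_of_lt (by omega) (by omega)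
    rw [d1, d2, if_pos h]; ring
  · rw [if_neg h]
    rcases lt_or_gt_of_ne h with hlt | hgt
    · have d2 : (r - p + L) / L = 0 := Int.ediv_eq_zero_of_lt (by omega) (by omega)
      have d1 : (r - p + L - 1) / L = 0 := Int.ediv_eq_zero_of_lt (by omega) (by omega)
      rw [d1, d2]; ring
    · have d2 : (r - p + L) / L = 1 := pvEdivOne L _ hL (by omega) (by omega)
      have d1 : (r - p + L - 1) / L = 1 := pvEdivOne L _ hL (by omega) (by omega)
      rw [d1, d2]; ring

theorem pvCeilZero (acts : List String) (p : Int) (hL : 0 < (acts.length : Int))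
    (hp0 : 0 ≤ p) (hpL : p < (acts.length : Int)) : pvCeil acts 0 p = 0 := by
  unfold pvCeil
  rw [PySem.Int.floordiv_eq_ediv_of_pos hL, Int.ediv_eq_zero_of_lt (by omega) (by omega)]

theorem pvZeroSum (xs : List String) (k : String) :
    ∀ (s p0 : Int), p0 < s →
    ((PySem.List.enumerate xs s).map
        (fun pa => if pa.2 = k then (if pa.1 = p0 then (1:Int) else 0) else 0)).sum = 0 := by
  induction xs with
  | nil => intro s p0 _; simp [PySem.List.enumerate_nil]
  | cons x xs ih =>
    intro s p0 h
    rw [PySem.List.enumerate_cons]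
    simp only [List.map_cons, List.sum_cons, if_neg (show ¬ s = p0 by omega)]
    rw [ih (s+1) p0 (by omega)]
    split <;> ring

theorem pvPick (xs : List String) (k : String) :
    ∀ (s : Int) (t : Nat) (_ : t < xs.length),
    ((PySem.List.enumerate xs s).map
        (fun pa => if pa.2 = k then (if pa.1 = s + (t : Int) then (1:Int) else 0) else 0)).sum
      = if xs.getD t "" = k then 1 else 0 := by
  induction xs with
  | nil => intro s t ht; simp at ht
  | cons x xs ih =>
    intro s t ht
    rw [PySem.List.enumerate_cons]
    simp only [List.map_cons, List.sum_cons]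
    cases t with
    | zero =>
      rw [pvZeroSum xs k (s+1) (s + (0:Nat)) (by omega)]
      simp [List.getD_cons_zero]
    | succ t =>
      have h1 : ¬ s = s + ((t:Nat)+1 : Int) := by omega
      have h2 : s + (((t+1 : Nat)) : Int) = (s+1) + (t : Int) := by push_cast; ring
      rw [h2]
      rw [ih (s+1) t (by simpa using ht)]
      have hx : (x :: xs).getD (t+1) "" = xs.getD t "" := by
        simp [List.getD_cons_succ]
      rw [hx]
      have h3 : (if s = s + 1 + (t:Int) then (1:Int) else 0) = 0 := if_neg (by omega)
      rw [h3]
      split <;> ring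

theorem pvF_zero (acts : List String) (hL : 0 < (acts.length : Int)) (k : String) :
    pvF acts 0 k = 0 := by
  unfold pvF
  have hcong : ∀ pa ∈ PySem.List.enumerate acts 0,
      (if pa.2 = k then pvCeil acts 0 pa.1 else 0) = 0 := by
    intro pa hpa
    rcases (PySem.List.mem_enumerate_iff acts 0 pa).1 hpa with ⟨t, ht, rfl⟩
    rw [pvCeilZero acts _ hL (by simp) (by simp; exact_mod_cast ht)]
    split <;> rfl
  rw [List.map_congr_left hcong]
  simp

theorem pvF_step (acts : List String) (hL : 0 < (acts.length : Int)) (T : Int) (hT : 0 ≤ T)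
    (k : String) :
    pvF acts (T + 1) k = pvF acts T k + (if pvAct acts T = k then 1 else 0) := by
  unfold pvF
  have hm0 : 0 ≤ PySem.Int.mod T (acts.length : Int) := PySem.Int.mod_nonneg T (by omega)
  have hmL : PySem.Int.mod T (acts.length : Int) < (acts.length : Int) := PySem.Int.mod_lt T (by omega)
  have hcong : ∀ pa ∈ PySem.List.enumerate acts 0,
      (if pa.2 = k then pvCeil acts (T+1) pa.1 else 0)
        = (if pa.2 = k then pvCeil acts T pa.1 else 0)
          + (if pa.2 = k then (if pa.1 = 0 + ((PySem.Int.mod T (acts.length : Int)).toNat : Int) then (1:Int) else 0) else 0) := by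
    intro pa hpa
    rcases (PySem.List.mem_enumerate_iff acts 0 pa).1 hpa with ⟨t, ht, rfl⟩
    simp only
    by_cases hk : acts[t] = k
    · rw [if_pos hk, if_pos hk, if_pos hk,
        pvCeilStep acts T (0 + (t:Int)) hL (by omega) (by omega) hT]
      have hc : (((PySem.Int.mod T (acts.length : Int)).toNat : Int)) = PySem.Int.mod T (acts.length : Int) := Int.toNat_of_nonneg hm0
      rw [hc]
      congr 1
      split_ifs <;> first | rfl | omega
    · rw [if_neg hk, if_neg hk, if_neg hk]; ring
  rw [List.map_congr_left hcong, PySem.List.sum_map_add_int]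
  congr 1
  rw [pvPick acts k 0 (PySem.Int.mod T (acts.length : Int)).toNat
      (by omega)]
  have hact : pvAct acts T = acts.getD (PySem.Int.mod T (acts.length : Int)).toNat "" := by
    unfold pvAct
    rw [PySem.List.pyGetD_eq_getElem acts "" hm0 (by omega)]
    rw [List.getD_eq_getElem acts "" (by omega)]
  rw [hact]

theorem pvFCount (acts : List String) (hL : 0 < (acts.length : Int)) :
    ∀ (T : Nat) (k : String),
    ((((PySem.List.pyRange 0 (T:Int) 1).map (pvAct acts)).count k : Nat) : Int)
      = pvF acts (T:Int) k := by
  intro T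
  induction T with
  | zero =>
    intro k
    rw [PySem.List.pyRange_one_eq_nil (by simp)]
    simp [pvF_zero acts hL k]
  | succ T ih =>
    intro k
    have hr : PySem.List.pyRange 0 ((T:Int)+1) 1
        = PySem.List.pyRange 0 (T:Int) 1 ++ [(T:Int)] := by
      simpa using PySem.List.pyRange_one_succ_right (a := 0) (b := (T:Int)) (by omega)
    push_cast
    rw [hr, List.map_append, List.count_append]
    push_cast
    rw [ih k, pvF_step acts hL (T:Int) (by omega) k]
    congr 1
    simp only [List.map_cons, List.map_nil, List.count_singleton]
    split <;> split <;> simp_all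
theorem pvContainsFold (xs : List String) :
    ∀ (d : PySem.Dict String Int) (a : String),
    (a ∈ xs ∨ d.contains a = true) → (xs.foldl (fun d a => d.insert a 0) d).contains a = true := by
  induction xs with
  | nil =>
    intro d a h
    simp only [List.foldl_nil]
    rcases h with h | h
    · exact absurd h (by simp)
    · exact h
  | cons x xs ih =>
    intro d a h
    simp only [List.foldl_cons]
    apply ih
    by_cases hx : a = x
    · right; rw [PySem.Dict.contains_insert]; simp [hx]
    · rcases h with h | h
      · rcases List.mem_cons.1 h with h' | h'
        · exact absurd h' hx
        · exact Or.inl h'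
      · right; rw [PySem.Dict.contains_insert]; simp [h]

theorem pvNodupFold (xs : List String) :
    ∀ (d : PySem.Dict String Int), d.keys.Nodup →
      (xs.foldl (fun d a => d.insert a 0) d).keys.Nodup := by
  induction xs with
  | nil => intro d h; simpa using h
  | cons x xs ih =>
    intro d h
    simp only [List.foldl_cons]
    exact ih _ (PySem.Dict.nodup_keys_insert d x 0 h)

theorem pvDictAdd (l : List (String × Int)) :
    ∀ (d : PySem.Dict String Int), d.keys.Nodup → (∀ p ∈ l, d.contains p.1 = true) →
    (l.foldl (fun d p => d.modify p.1 0 (· + p.2)) d).items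
      = d.items.map (fun q =>
          (q.1, q.2 + ((l.filter (fun p => p.1 == q.1)).map (fun p => p.2)).sum)) := by
  induction l with
  | nil => intro d _ _; simp
  | cons p l ih =>
    intro d hnd hcont
    have hc : d.contains p.1 = true := hcont p (List.mem_cons_self)
    have hmod : d.modify p.1 0 (· + p.2) = d.insert p.1 (d.getD p.1 0 + p.2) := rfl
    have hkeys : (d.modify p.1 0 (· + p.2)).keys = d.keys := by
      rw [hmod]; exact PySem.Dict.keys_insert_of_contains d _ hc
    have hnd' : (d.modify p.1 0 (· + p.2)).keys.Nodup := by rw [hkeys]; exact hnd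
    have hcont' : ∀ r ∈ l, (d.modify p.1 0 (· + p.2)).contains r.1 = true := by
      intro r hr
      rw [hmod, PySem.Dict.contains_insert]
      simp [hcont r (List.mem_cons_of_mem _ hr)]
    simp only [List.foldl_cons]
    rw [ih _ hnd' hcont', hmod, PySem.Dict.items_insert_of_contains d _ hc, List.map_map]
    apply List.map_congr_left
    intro q hq
    have hget : d.getD q.1 0 = q.2 := PySem.Dict.getD_of_mem_items d (by simpa using hq) hnd 0
    simp only [Function.comp]
    by_cases hqp : q.1 = p.1
    · rw [List.filter_cons]
      simp only [if_pos (by simp [hqp] : (p.1 == q.1) = true)]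
      simp only [if_pos (by simp [hqp] : (q.1 == p.1) = true)]
      rw [← hqp, hget]
      simp only [List.map_cons, List.sum_cons]
      rw [add_assoc]
    · rw [List.filter_cons]
      simp only [if_neg (by simp [Ne.symm hqp] : ¬ (p.1 == q.1) = true)]
      simp only [if_neg (by simp [hqp] : ¬ (q.1 == p.1) = true)]

theorem pvFilterOnes (l : List String) (k : String) :
    (((l.map (fun a => (a, (1:Int)))).filter (fun p => p.1 == k)).map (fun p => p.2)).sum
      = (l.count k : Int) := by
  induction l with
  | nil => simp
  | cons a l ih =>
    by_cases h : a = k <;>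
      simp [List.filter_cons, List.count_cons, h, ih] <;> ring

theorem pvFilterSum (l : List (Int × String)) (k : String) (f : Int → Int) :
    (((l.map (fun pa => (pa.2, f pa.1))).filter (fun p => p.1 == k)).map (fun p => p.2)).sum
      = (l.map (fun pa => if pa.2 = k then f pa.1 else 0)).sum := by
  induction l with
  | nil => simp
  | cons pa l ih =>
    by_cases h : pa.2 = k <;>
      simp [List.filter_cons, h, ih]

theorem pvSumSub {α : Type} (l : List α) (c : α → Bool) (f g : α → Int) :
    (l.map (fun x => if c x then f x - g x else 0)).sum
      = (l.map (fun x => if c x then f x else 0)).sum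
        - (l.map (fun x => if c x then g x else 0)).sum := by
  induction l with
  | nil => simp
  | cons a l ih =>
    by_cases h : c a <;> simp [h, ih] <;> ring

theorem pvIdleFold {α : Type} (cond : α → Bool) (v : α → Int) (l : List α) :
    ∀ (i0 : Int),
    l.foldl (fun i x => if cond x then i + v x else i) i0
      = i0 + (l.map (fun x => if cond x then v x else 0)).sum := by
  induction l with
  | nil => intro i0; simp
  | cons a l ih =>
    intro i0
    by_cases h : cond a <;> simp [h, ih] <;> ring

theorem pvRangeToNat (n : Int) :
    PySem.List.pyRange 0 n 1 = PySem.List.pyRange 0 (n.toNat : Int) 1 := by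
  by_cases h : n ≤ 0
  · rw [PySem.List.pyRange_one_eq_nil h, PySem.List.pyRange_one_eq_nil (by omega)]
  · rw [Int.toNat_of_nonneg (by omega)]
-- proof-only restatements of the two ports' loop bodies
def pvStep (acts : List String) (st : Array String × PySem.Dict String Int × Int) (i : Int) :
    Array String × PySem.Dict String Int × Int :=
  (st.1.setIfInBounds i.toNat (pvAct acts st.2.2),
   st.2.1.modify (pvAct acts st.2.2) 0 (· + 1),
   st.2.2 + 1)

def pvBSet (acts : List String) (bh : Array String) (p : Int × Int) : Array String :=
  bh.setIfInBounds p.1.toNat (pvAct acts p.2)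

-- the list-level mirror of pvBSet, on which the prefix characterization is proved
def pvBSetL (acts : List String) (bh : List String) (p : Int × Int) : List String :=
  PySem.List.pySetD bh p.1 (pvAct acts p.2)

theorem pvBSim (acts : List String) :
    ∀ (l : List (Int × Int)) (bh : Array String), (∀ p ∈ l, 0 ≤ p.1) →
    (l.foldl (pvBSet acts) bh).toList = l.foldl (pvBSetL acts) bh.toList := by
  intro l
  induction l with
  | nil => intro bh _; simp
  | cons p l ih =>
    intro bh hpos
    simp only [List.foldl_cons]
    rw [ih _ (fun q hq => hpos q (List.mem_cons_of_mem _ hq))]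
    congr 1
    unfold pvBSet pvBSetL
    rw [PySem.List.pySetD_of_nonneg _ _ (hpos p List.mem_cons_self), Array.toList_setIfInBounds]

def pvDStep (acts : List String) (d : PySem.Dict String Int) (m : Int) : PySem.Dict String Int :=
  d.modify (pvAct acts m) 0 (· + 1)

theorem pvTriple (acts : List String) (l : List Int) :
    ∀ (bh : Array String) (d : PySem.Dict String Int) (j : Int),
    l.foldl (pvStep acts) (bh, d, j)
      = ((l.zip (PySem.List.pyRange j (j + (l.length : Int)) 1)).foldl (pvBSet acts) bh,
         (PySem.List.pyRange j (j + (l.length : Int)) 1).foldl (pvDStep acts) d,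
         j + (l.length : Int)) := by
  induction l with
  | nil =>
    intro bh d j
    simp [PySem.List.pyRange_one_eq_nil (le_refl j)]
  | cons i l ih =>
    intro bh d j
    have he : j + (((i :: l).length : Nat) : Int) = (j + 1) + (l.length : Int) := by
      simp only [List.length_cons]; push_cast; ring
    have hcons : PySem.List.pyRange j (j + (((i :: l).length : Nat) : Int) ) 1
        = j :: PySem.List.pyRange (j + 1) ((j + 1) + (l.length : Int)) 1 := by
      rw [he, PySem.List.pyRange_one_cons (by push_cast; omega)]
    rw [hcons, he]
    simp only [List.zip_cons_cons, List.foldl_cons]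
    have hstep : pvStep acts (bh, d, j) i
        = (bh.setIfInBounds i.toNat (pvAct acts j), d.modify (pvAct acts j) 0 (· + 1), j + 1) := rfl
    rw [hstep, ih]
    rfl

theorem pvSetFoldAux (acts : List String) (nn : Nat) :
    ∀ (k : Nat), k ≤ nn → ∀ (j : Int) (bh : List String), bh.length = nn →
    ((PySem.List.pyRange 0 (k : Int) 1).zip (PySem.List.pyRange j (j + (k : Int)) 1)).foldl
        (pvBSetL acts) bh
      = (PySem.List.pyRange j (j + (k : Int)) 1).map (pvAct acts) ++ bh.drop k := by
  intro k
  induction k with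
  | zero =>
    intro _ j bh _
    simp [PySem.List.pyRange_one_eq_nil (le_refl j)]
  | succ k ihk =>
    intro hk j bh hbh
    have h1 : PySem.List.pyRange 0 (((k+1 : Nat)) : Int) 1
        = PySem.List.pyRange 0 (k : Int) 1 ++ [(k : Int)] := by
      push_cast
      exact PySem.List.pyRange_one_succ_right (by omega)
    have h2 : PySem.List.pyRange j (j + ((k+1 : Nat) : Int)) 1
        = PySem.List.pyRange j (j + (k : Int)) 1 ++ [j + (k : Int)] := by
      have : j + ((k+1 : Nat) : Int) = (j + (k : Int)) + 1 := by push_cast; ring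
      rw [this]
      exact PySem.List.pyRange_one_succ_right (by omega)
    have hlen : (PySem.List.pyRange 0 (k : Int) 1).length
        = (PySem.List.pyRange j (j + (k : Int)) 1).length := by
      rw [PySem.List.length_pyRange_one, PySem.List.length_pyRange_one]
      congr 1
      omega
    rw [h1, h2, List.zip_append hlen, List.foldl_append]
    rw [ihk (by omega) j bh hbh]
    simp only [List.zip_cons_cons, List.zip_nil_right, List.foldl_cons, List.foldl_nil]
    have hmaplen : ((PySem.List.pyRange j (j + (k : Int)) 1).map (pvAct acts)).length = k := by
      rw [List.length_map, PySem.List.length_pyRange_one]; omega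
    unfold pvBSetL
    rw [PySem.List.pySetD_of_nonneg _ _ (by omega)]
    have htn : ((k : Int)).toNat = k := by omega
    rw [htn, List.set_append, if_neg (by omega), hmaplen]
    have hdrop : bh.drop k = bh[k] :: bh.drop (k+1) := List.drop_eq_getElem_cons (by omega)
    rw [Nat.sub_self, hdrop, List.set_cons_zero, List.map_append]
    simp

theorem pvPass (acts : List String) (num_bees : Int) (nn : Nat) (hnn : nn = num_bees.toNat) :
    ∀ (j : Int) (bh : Array String) (d : PySem.Dict String Int), bh.toList.length = nn →
    (PySem.List.pyRange 0 num_bees 1).foldl (pvStep acts) (bh, d, j)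
      = (((PySem.List.pyRange j (j + (nn : Int)) 1).map (pvAct acts)).toArray,
         (PySem.List.pyRange j (j + (nn : Int)) 1).foldl (pvDStep acts) d,
         j + (nn : Int)) := by
  intro j bh d hbh
  rw [pvRangeToNat, ← hnn, pvTriple]
  have hlen : ((PySem.List.pyRange 0 (nn : Int) 1).length : Int) = (nn : Int) := by
    rw [PySem.List.length_pyRange_one]; omega
  rw [hlen]
  congr 1
  apply Array.toList_inj.mp
  rw [pvBSim acts _ bh (by
        intro p hp
        have h1 := (List.of_mem_zip (by simpa using hp)).1
        have h2 := (PySem.List.mem_pyRange_one).1 h1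
        omega)]
  rw [pvSetFoldAux acts nn nn (le_refl nn) j bh.toList hbh]
  rw [List.drop_of_length_le (by omega), List.append_nil, List.toList_toArray]

def pvD0 (acts : List String) : PySem.Dict String Int :=
  acts.foldl (fun d a => d.insert a 0) PySem.Dict.empty

-- canonical value of both ports when activities ≠ []
def pvOut (num_bees : Int) (acts : List String) : String :=
  PySem.Str.join ", "
    (((pvD0 acts).items.map (fun q =>
        q.1 ++ ": " ++ PySem.Int.toStr (q.2 + pvF acts (5 * (num_bees.toNat : Int)) q.1))) ++
     ["idle bees: " ++ PySem.Int.toStr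
        (pvF acts (5 * (num_bees.toNat : Int)) "idle" - pvF acts (4 * (num_bees.toNat : Int)) "idle")])

theorem pvNodupD0 (acts : List String) : (pvD0 acts).keys.Nodup :=
  pvNodupFold acts PySem.Dict.empty (by simp [PySem.Dict.empty, PySem.Dict.keys])

theorem pvContainsD0 (acts : List String) {a : String} (h : a ∈ acts) :
    (pvD0 acts).contains a = true :=
  pvContainsFold acts PySem.Dict.empty a (Or.inl h)

theorem pvActMem (acts : List String) (hL : 0 < (acts.length : Int)) (m : Int) :
    pvAct acts m ∈ acts := by
  unfold pvAct
  apply PySem.List.pyGetD_mem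
  have h0 : 0 ≤ PySem.Int.mod m (acts.length : Int) := PySem.Int.mod_nonneg m hL
  have h1 : PySem.Int.mod m (acts.length : Int) < (acts.length : Int) := PySem.Int.mod_lt m hL
  simp only [PySem.Raise.InRange]
  omega

theorem pvBval (num_bees : Int) (acts : List String) (hA : acts ≠ []) :
    busy_beehive_alt num_bees acts = pvOut num_bees acts := by
  have hL : 0 < (acts.length : Int) := by
    have := List.length_pos_iff.mpr hA; omega
  have hmax : max num_bees 0 = (num_bees.toNat : Int) := by omega
  simp only [busy_beehive_alt]
  rw [show (fun (st : PySem.Dict String Int × Int) (pa : Int × String) =>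
        (st.1.modify pa.2 0 (· + PySem.Int.floordiv ((5 * max num_bees 0) - pa.1 + (acts.length : Int) - 1) (acts.length : Int)),
         if pa.2 == "idle"
         then st.2 + (PySem.Int.floordiv ((5 * max num_bees 0) - pa.1 + (acts.length : Int) - 1) (acts.length : Int)
                      - PySem.Int.floordiv ((4 * max num_bees 0) - pa.1 + (acts.length : Int) - 1) (acts.length : Int))
         else st.2))
      = (fun st pa =>
          ((fun (d : PySem.Dict String Int) (pa : Int × String) =>
              d.modify pa.2 0 (· + pvCeil acts (5 * max num_bees 0) pa.1)) st.1 pa,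
           (fun (iv : Int) (pa : Int × String) =>
              if pa.2 == "idle"
              then iv + (pvCeil acts (5 * max num_bees 0) pa.1 - pvCeil acts (4 * max num_bees 0) pa.1)
              else iv) st.2 pa)) from rfl]
  rw [PySem.List.foldl_prod_mk
        (fun (d : PySem.Dict String Int) (pa : Int × String) =>
          d.modify pa.2 0 (· + pvCeil acts (5 * max num_bees 0) pa.1))
        (fun (iv : Int) (pa : Int × String) =>
          if pa.2 == "idle"
          then iv + (pvCeil acts (5 * max num_bees 0) pa.1 - pvCeil acts (4 * max num_bees 0) pa.1)
          else iv)
        (PySem.List.enumerate acts 0) (acts.foldl (fun d a => d.insert a 0) PySem.Dict.empty) 0]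
  dsimp only
  have hdict : (PySem.List.enumerate acts 0).foldl
        (fun (d : PySem.Dict String Int) (pa : Int × String) =>
          d.modify pa.2 0 (· + pvCeil acts (5 * max num_bees 0) pa.1))
        (acts.foldl (fun d a => d.insert a 0) PySem.Dict.empty)
      = ((PySem.List.enumerate acts 0).map
          (fun pa => (pa.2, pvCeil acts (5 * max num_bees 0) pa.1))).foldl
          (fun d p => d.modify p.1 0 (· + p.2))
          (acts.foldl (fun d a => d.insert a 0) PySem.Dict.empty) := by
    rw [List.foldl_map]
  rw [hdict]
  have hcont : ∀ p ∈ (PySem.List.enumerate acts 0).map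
      (fun pa => (pa.2, pvCeil acts (5 * max num_bees 0) pa.1)),
      (acts.foldl (fun d a => d.insert a (0:Int)) PySem.Dict.empty).contains p.1 = true := by
    intro p hp
    rcases List.mem_map.1 hp with ⟨pa, hpa, rfl⟩
    rcases (PySem.List.mem_enumerate_iff acts 0 pa).1 hpa with ⟨t, ht, rfl⟩
    simpa [pvD0] using pvContainsD0 acts (List.getElem_mem ht)
  rw [pvDictAdd ((PySem.List.enumerate acts 0).map
        (fun pa => (pa.2, pvCeil acts (5 * max num_bees 0) pa.1)))
      (acts.foldl (fun d a => d.insert a (0:Int)) PySem.Dict.empty)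
      (by simpa [pvD0] using pvNodupD0 acts) hcont]
  rw [pvIdleFold
        (fun (pa : Int × String) => pa.2 == "idle")
        (fun pa => pvCeil acts (5 * max num_bees 0) pa.1 - pvCeil acts (4 * max num_bees 0) pa.1)
        (PySem.List.enumerate acts 0) 0]
  rw [pvSumSub]
  simp only [pvFilterSum, beq_iff_eq, hmax]
  unfold pvOut pvD0 pvF
  rw [List.map_map]
  simp only [zero_add]
  rfl
theorem pvPass' (acts : List String) (num_bees : Int) (nn : Nat) (hnn : nn = num_bees.toNat)
    (j e : Int) (he : e = j + (nn : Int)) (bh : Array String) (d : PySem.Dict String Int)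
    (hbh : bh.toList.length = nn) :
    (PySem.List.pyRange 0 num_bees 1).foldl (pvStep acts) (bh, d, j)
      = (((PySem.List.pyRange j e 1).map (pvAct acts)).toArray,
         (PySem.List.pyRange j e 1).foldl (pvDStep acts) d,
         e) := by
  subst he
  exact pvPass acts num_bees nn hnn j bh d hbh

theorem pvAval (num_bees : Int) (acts : List String) (hA : acts ≠ []) :
    busy_beehive num_bees acts = pvOut num_bees acts := by
  have hL : 0 < (acts.length : Int) := by
    have := List.length_pos_iff.mpr hA; omega
  simp only [busy_beehive]
  rw [show (fun (st : Array String × PySem.Dict String Int × Int) (i : Int) =>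
        (st.1.setIfInBounds i.toNat
           (PySem.List.pyGetD acts (PySem.Int.mod st.2.2 (acts.length : Int)) ""),
         st.2.1.modify (PySem.List.pyGetD acts (PySem.Int.mod st.2.2 (acts.length : Int)) "") 0 (· + 1),
         st.2.2 + 1)) = pvStep acts from rfl]
  rw [show PySem.List.pyRange 0 5 1 = [0, 1, 2, 3, 4] from by decide]
  simp only [List.foldl_cons, List.foldl_nil]
  have hbh0 : (Array.replicate num_bees.toNat "idle").toList.length = num_bees.toNat := by
    simp
  have hmap : ∀ a b : Int, (b - a).toNat = num_bees.toNat →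
      (((PySem.List.pyRange a b 1).map (pvAct acts)).toArray).toList.length = num_bees.toNat := by
    intro a b h
    rw [List.toList_toArray, List.length_map, PySem.List.length_pyRange_one]; omega
  rw [pvPass' acts num_bees num_bees.toNat rfl 0 ((num_bees.toNat : Int)) (by ring)
        (Array.replicate num_bees.toNat "idle") _ hbh0]
  rw [pvPass' acts num_bees num_bees.toNat rfl ((num_bees.toNat : Int)) (2 * (num_bees.toNat : Int)) (by ring)
        (((PySem.List.pyRange 0 ((num_bees.toNat : Int)) 1).map (pvAct acts)).toArray) _ (hmap _ _ (by omega))]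
  rw [pvPass' acts num_bees num_bees.toNat rfl (2 * (num_bees.toNat : Int)) (3 * (num_bees.toNat : Int)) (by ring)
        (((PySem.List.pyRange ((num_bees.toNat : Int)) (2 * (num_bees.toNat : Int)) 1).map (pvAct acts)).toArray) _ (hmap _ _ (by omega))]
  rw [pvPass' acts num_bees num_bees.toNat rfl (3 * (num_bees.toNat : Int)) (4 * (num_bees.toNat : Int)) (by ring)
        (((PySem.List.pyRange (2 * (num_bees.toNat : Int)) (3 * (num_bees.toNat : Int)) 1).map (pvAct acts)).toArray) _ (hmap _ _ (by omega))]
  rw [pvPass' acts num_bees num_bees.toNat rfl (4 * (num_bees.toNat : Int)) (5 * (num_bees.toNat : Int)) (by ring)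
        (((PySem.List.pyRange (3 * (num_bees.toNat : Int)) (4 * (num_bees.toNat : Int)) 1).map (pvAct acts)).toArray) _ (hmap _ _ (by omega))]
  dsimp only
  try simp only [List.toList_toArray]
  have ecomb : ∀ (d : PySem.Dict String Int) (a m b : Int), a ≤ m → m ≤ b →
      (PySem.List.pyRange m b 1).foldl (pvDStep acts)
        ((PySem.List.pyRange a m 1).foldl (pvDStep acts) d)
      = (PySem.List.pyRange a b 1).foldl (pvDStep acts) d := by
    intro d a m b h1 h2
    rw [← List.foldl_append, ← PySem.List.pyRange_one_append a m b h1 h2]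
  rw [ecomb _ 0 ((num_bees.toNat : Int)) (2 * (num_bees.toNat : Int)) (by omega) (by omega),
      ecomb _ 0 (2 * (num_bees.toNat : Int)) (3 * (num_bees.toNat : Int)) (by omega) (by omega),
      ecomb _ 0 (3 * (num_bees.toNat : Int)) (4 * (num_bees.toNat : Int)) (by omega) (by omega),
      ecomb _ 0 (4 * (num_bees.toNat : Int)) (5 * (num_bees.toNat : Int)) (by omega) (by omega)]
  have hfold : (PySem.List.pyRange 0 (5 * (num_bees.toNat : Int)) 1).foldl (pvDStep acts)
        (acts.foldl (fun d a => d.insert a 0) PySem.Dict.empty)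
      = ((PySem.List.pyRange 0 (5 * (num_bees.toNat : Int)) 1).map
            (fun m => (pvAct acts m, (1:Int)))).foldl
          (fun d p => d.modify p.1 0 (· + p.2))
          (acts.foldl (fun d a => d.insert a 0) PySem.Dict.empty) := by
    rw [List.foldl_map]
    rfl
  rw [hfold]
  have hcontA : ∀ p ∈ (PySem.List.pyRange 0 (5 * (num_bees.toNat : Int)) 1).map
      (fun m => (pvAct acts m, (1:Int))),
      (acts.foldl (fun d a => d.insert a (0:Int)) PySem.Dict.empty).contains p.1 = true := by
    intro p hp
    rcases List.mem_map.1 hp with ⟨m, _, rfl⟩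
    simpa [pvD0] using pvContainsD0 acts (pvActMem acts hL m)
  rw [pvDictAdd ((PySem.List.pyRange 0 (5 * (num_bees.toNat : Int)) 1).map
        (fun m => (pvAct acts m, (1:Int))))
      (acts.foldl (fun d a => d.insert a (0:Int)) PySem.Dict.empty)
      (by simpa [pvD0] using pvNodupD0 acts) hcontA]
  have hmm : (PySem.List.pyRange 0 (5 * (num_bees.toNat : Int)) 1).map
        (fun m => (pvAct acts m, (1:Int)))
      = ((PySem.List.pyRange 0 (5 * (num_bees.toNat : Int)) 1).map (pvAct acts)).map
          (fun a => (a, (1:Int))) := by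
    rw [List.map_map]
    rfl
  simp only [hmm, pvFilterOnes]
  have hF5 : ∀ k, ((((PySem.List.pyRange 0 (5 * (num_bees.toNat : Int)) 1).map (pvAct acts)).count k : Nat) : Int)
      = pvF acts (5 * (num_bees.toNat : Int)) k := by
    intro k
    have h := pvFCount acts hL (5 * num_bees.toNat) k
    rwa [show (((5 * num_bees.toNat : Nat)) : Int) = 5 * (num_bees.toNat : Int) from by push_cast; ring] at h
  have hF4 : ∀ k, ((((PySem.List.pyRange 0 (4 * (num_bees.toNat : Int)) 1).map (pvAct acts)).count k : Nat) : Int)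
      = pvF acts (4 * (num_bees.toNat : Int)) k := by
    intro k
    have h := pvFCount acts hL (4 * num_bees.toNat) k
    rwa [show (((4 * num_bees.toNat : Nat)) : Int) = 4 * (num_bees.toNat : Int) from by push_cast; ring] at h
  simp only [hF5]
  have hidle : ((PySem.List.count
        ((PySem.List.pyRange (4 * (num_bees.toNat : Int)) (5 * (num_bees.toNat : Int)) 1).map (pvAct acts))
        "idle" : Nat) : Int)
      = pvF acts (5 * (num_bees.toNat : Int)) "idle" - pvF acts (4 * (num_bees.toNat : Int)) "idle" := by
    have h5 := hF5 "idle"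
    have h4 := hF4 "idle"
    have hsplit : PySem.List.pyRange 0 (5 * (num_bees.toNat : Int)) 1
        = PySem.List.pyRange 0 (4 * (num_bees.toNat : Int)) 1
          ++ PySem.List.pyRange (4 * (num_bees.toNat : Int)) (5 * (num_bees.toNat : Int)) 1 :=
      PySem.List.pyRange_one_append 0 _ _ (by omega) (by omega)
    rw [hsplit, List.map_append, List.count_append] at h5
    rw [PySem.List.count_eq]
    push_cast at h5 h4 ⊢
    omega
  rw [hidle]
  rw [PySem.List.foldl_append_singleton_eq_map, List.nil_append]
  unfold pvOut pvD0
  rw [List.map_map]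
  rfl
-- ===== VERDICT (by name: the statement is the Claim_ definition above) =====
theorem busy_beehive_spec : Claim_equal_busy_beehive := by
  intro num_bees acts _ hpre
  unfold Spec_busy_beehive
  by_cases hA : acts = []
  · subst hA
    have hn : num_bees ≤ 0 := by
      rcases hpre with h | h
      · exact h
      · exact absurd rfl h
    have h0 : num_bees.toNat = 0 := by omega
    simp [busy_beehive, busy_beehive_alt, PySem.List.pyRange_one_eq_nil hn,
      h0, PySem.List.enumerate_nil, Array.toList_replicate,
      PySem.Dict.empty, PySem.Dict.items]
  · rw [pvAval num_bees acts hA, pvBval num_bees acts hA]
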